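-- pv_equiv track=rewrite | github.com/jkyoon2/algorithm-study | 04-implementation/boj-8958.py | scoreProgram
-- ===== SOURCE A (Python) =====
-- from typing import List
-- from typing import List
--
-- def scoreProgram(result: List[str]):
--     score = [0] * len(result)
--
--     for idx, ans in enumerate(result):
--         if ans == 'O':
--             score[idx] = score[idx - 1] + 1 if idx > 0 else 1
--         else:
--             score[idx] = 0
--
--     return sum(score)
-- ===== SOURCE B (Python) =====
-- from typing import List
--
-- def scoreProgram(result: List[str]):
--     # Run-length scan: for each maximal run of L 'O's add the triangular number L*(L+1)//2.
--     total = 0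
--     i = 0
--     n = len(result)
--     while i < n:
--         if result[i] == 'O':
--             j = i
--             while j < n and result[j] == 'O':
--                 j += 1
--             L = j - i
--             total += L * (L + 1) // 2
--             i = j
--         else:
--             i += 1
--     return total
-- ===== Notes on version B (the rewrite author's own statement) =====
-- stated objective: alternative
-- what changed: A allocates a per-position score array, computes a running streak value at every index and sums the array; B never materialises per-position scores: it scans for maximal runs of 'O' and adds the closed-form triangular number L*(L+1)//2 per run.
import Mathlib
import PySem

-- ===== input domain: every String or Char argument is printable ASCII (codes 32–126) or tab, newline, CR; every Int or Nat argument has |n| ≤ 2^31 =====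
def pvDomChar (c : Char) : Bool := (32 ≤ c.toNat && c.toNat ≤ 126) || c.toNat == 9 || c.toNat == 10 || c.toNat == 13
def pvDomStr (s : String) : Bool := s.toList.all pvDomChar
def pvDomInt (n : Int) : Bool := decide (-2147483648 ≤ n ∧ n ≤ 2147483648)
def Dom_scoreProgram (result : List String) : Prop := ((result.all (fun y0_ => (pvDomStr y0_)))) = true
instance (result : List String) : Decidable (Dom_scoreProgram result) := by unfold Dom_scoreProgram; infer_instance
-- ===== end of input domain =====

-- B replaces A's per-position running-streak array (built and then summed) by a run-length
-- scan adding the closed-form triangular number per maximal run of 'O'.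

-- ===== PORT A =====
-- the for-loop over enumerate(result): idx is the position, prev the previously written score
def scoreProgramGo : List String → Nat → Int → List Int
  | [], _, _ => []
  | ans :: rest, idx, prev =>
      let s : Int := if ans = "O" then (if idx > 0 then prev + 1 else 1) else 0
      s :: scoreProgramGo rest (idx + 1) s

def scoreProgram (result : List String) : Int :=
  (scoreProgramGo result 0 0).sum

-- ===== PORT B =====
-- inner while loop: length of the leading run of "O"
def runO : List String → Nat
  | [] => 0
  | a :: rest => if a = "O" then runO rest + 1 else 0

-- outer while loop over the list
def scoreProgramAltGo : List String → Int
  | [] => 0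
  | a :: rest =>
      if a = "O" then
        let L : Nat := runO rest + 1
        ((L * (L + 1) / 2 : Nat) : Int) + scoreProgramAltGo (rest.drop (runO rest))
      else
        scoreProgramAltGo rest
termination_by xs => xs.length
decreasing_by
  all_goals simp [List.length_drop]

def scoreProgram_alt (result : List String) : Int :=
  scoreProgramAltGo result

-- ===== PRECONDITION & SPEC =====
def Spec_scoreProgram (result : List String) (out : Int) : Prop := out = scoreProgram_alt result
instance (result : List String) (out : Int) : Decidable (Spec_scoreProgram result out) := by unfold Spec_scoreProgram; infer_instance

-- ===== CLAIM (what is proved, stated in full; the proofs are below) =====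
def Claim_equal_scoreProgram : Prop := ∀ (result : List String), Dom_scoreProgram result → Spec_scoreProgram result (scoreProgram result)

-- ===== LEMMAS AND PROOFS =====

def tri (n : Nat) : Int := ((n * (n + 1) / 2 : Nat) : Int)

theorem tri_succ (n : Nat) : tri (n + 1) = tri n + (n + 1 : Nat) := by
  unfold tri
  have h1 : (n + 1) * (n + 1 + 1) = n * (n + 1) + 2 * (n + 1) := by ring
  have h2 : (n + 1) * (n + 1 + 1) / 2 = n * (n + 1) / 2 + (n + 1) := by omega
  rw [h2]; push_cast; ring

theorem altGo_nil : scoreProgramAltGo [] = 0 := by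
  rw [scoreProgramAltGo]

theorem altGo_cons_O (rest : List String) :
    scoreProgramAltGo ("O" :: rest)
      = tri (runO rest + 1) + scoreProgramAltGo (rest.drop (runO rest)) := by
  rw [scoreProgramAltGo]
  simp [tri]

theorem altGo_cons_ne (a : String) (rest : List String) (h : a ≠ "O") :
    scoreProgramAltGo (a :: rest) = scoreProgramAltGo rest := by
  rw [scoreProgramAltGo]
  simp [h]

theorem goB_run (xs : List String) :
    scoreProgramAltGo xs = tri (runO xs) + scoreProgramAltGo (xs.drop (runO xs)) := by
  cases xs with
  | nil => simp [altGo_nil, runO, tri]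
  | cons a rest =>
      by_cases h : a = "O"
      · subst h
        rw [altGo_cons_O]
        simp [runO]
      · simp [runO, h, tri, altGo_cons_ne a rest h]

-- the index argument only matters through idx > 0
theorem go_idx (xs : List String) : ∀ (i : Nat) (p : Int),
    scoreProgramGo xs (i + 1) p = scoreProgramGo xs 1 p := by
  induction xs with
  | nil => intro i p; rfl
  | cons a rest ih =>
      intro i p
      simp only [scoreProgramGo, gt_iff_lt, Nat.zero_lt_succ, if_true]
      rw [ih (i + 1), ih 1]

theorem go_key : ∀ (xs : List String) (p : Nat),
    (scoreProgramGo xs 1 (p : Int)).sum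
      = tri (p + runO xs) - tri p + scoreProgramAltGo (xs.drop (runO xs)) := by
  intro xs
  induction xs with
  | nil => intro p; simp [scoreProgramGo, altGo_nil, runO]
  | cons a rest ih =>
      intro p
      by_cases h : a = "O"
      · subst h
        simp only [scoreProgramGo, gt_iff_lt, Nat.zero_lt_succ, if_true,
          List.sum_cons, runO]
        have hcast : ((p : Int) + 1) = ((p + 1 : Nat) : Int) := by push_cast; ring
        rw [hcast, go_idx rest 1, ih (p + 1)]
        have hdrop : (("O" :: rest).drop (runO rest + 1)) = rest.drop (runO rest) := by
          simp
        rw [hdrop, show (p + (runO rest + 1)) = ((p + 1) + runO rest) by omega, tri_succ p]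
        push_cast
        ring
      · simp only [scoreProgramGo, if_neg h, List.sum_cons, runO, Nat.add_zero,
          List.drop_zero]
        rw [go_idx rest 1]
        have h0 : (scoreProgramGo rest 1 (0 : Int)).sum
            = tri (runO rest) + scoreProgramAltGo (rest.drop (runO rest)) := by
          have := ih 0
          simpa [tri] using this
        rw [h0, altGo_cons_ne a rest h, goB_run rest]
        ring

-- ===== VERDICT (by name: the statement is the Claim_ definition above) =====
theorem scoreProgram_spec : Claim_equal_scoreProgram := by
  intro result _
  unfold Spec_scoreProgram scoreProgram scoreProgram_alt
  have h0 : scoreProgramGo result 0 0 = scoreProgramGo result 1 0 := by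
    cases result with
    | nil => rfl
    | cons a rest =>
        simp only [scoreProgramGo, gt_iff_lt, Nat.lt_irrefl, Nat.zero_lt_succ,
          if_true, if_false]
        by_cases h : a = "O" <;> simp [h, go_idx rest 1]
  have hkey := go_key result 0
  simp only [Nat.cast_zero, Nat.zero_add] at hkey
  rw [h0, hkey, goB_run result]
  simp [tri]
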